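-- pv_equiv track=rewrite | github.com/Michael786-HUB/oecd-ai-api-exploration-tool | scripts/categorize_datasets.py | restructure_by_category
-- ===== SOURCE A (Python) =====
-- def restructure_by_category(categorized_catalog):
--     """
--     Restructure the catalog to group datasets by category.
--
--     Returns:
--     {
--         "Health": {
--             "datasets": {
--                 "DSD_SHA@DF_SHA": {...},
--                 ...
--             }
--         },
--         ...
--     }
--     """
--
--     structured = {}
--
--     for dataset_id, metadata in categorized_catalog.items():
--         category = metadata.get('category', 'Uncategorized')
--
--         if category not in structured:
--             structured[category] = {"datasets": {}}
--
--         # Remove category from individual dataset metadata (it's redundant now)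
--         dataset_meta = {k: v for k, v in metadata.items() if k != 'category'}
--
--         structured[category]["datasets"][dataset_id] = dataset_meta
--
--     return structured
-- ===== SOURCE B (Python) =====
-- def restructure_by_category(categorized_catalog):
--     """Group datasets by category: first collect the categories in order of
--     first appearance, then build each category's dataset group in one grouped
--     comprehension over the catalog (instead of A's incremental insertion scan)."""
--
--     items = list(categorized_catalog.items())
--
--     def key(metadata):
--         return metadata.get('category', 'Uncategorized')
--
--     categories = []
--     for _, metadata in items:
--         c = key(metadata)
--         if c not in categories:
--             categories.append(c)
--
--     return {
--         c: {"datasets": {dataset_id: {k: v for k, v in metadata.items() if k != 'category'}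
--                          for dataset_id, metadata in items if key(metadata) == c}}
--         for c in categories
--     }
-- ===== Notes on version B (the rewrite author's own statement) =====
-- stated objective: alternative
-- what changed: B replaces A's single incremental hash-insertion scan (create-or-update the nested dict per item) by a two-phase plan: one pass collecting the distinct categories in first-appearance order, then one grouped dict comprehension per category that builds each category's complete 'datasets' dict at once.
import Mathlib
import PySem

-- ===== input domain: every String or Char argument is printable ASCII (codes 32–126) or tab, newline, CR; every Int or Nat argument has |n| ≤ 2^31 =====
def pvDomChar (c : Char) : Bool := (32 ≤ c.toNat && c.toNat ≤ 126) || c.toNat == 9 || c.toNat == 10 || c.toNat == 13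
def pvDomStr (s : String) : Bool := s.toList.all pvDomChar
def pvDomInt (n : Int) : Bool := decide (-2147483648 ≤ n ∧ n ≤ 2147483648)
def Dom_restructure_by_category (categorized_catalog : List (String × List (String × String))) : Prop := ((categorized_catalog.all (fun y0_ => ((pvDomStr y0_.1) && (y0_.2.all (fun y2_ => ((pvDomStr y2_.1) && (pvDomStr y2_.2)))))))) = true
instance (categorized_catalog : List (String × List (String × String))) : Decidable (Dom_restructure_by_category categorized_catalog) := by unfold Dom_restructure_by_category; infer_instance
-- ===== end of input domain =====

-- B groups by category in two phases (collect categories in first-appearance order,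
-- then build each category's whole dataset group at once) instead of A's single
-- incremental create-or-update insertion scan; same result, similar cost.


-- Shared dict primitives over association lists (Python dicts under the type convention):
-- exact wrappers of PySem.Dict insert / modify acting on the items list.
def pyInsert {ν : Type} (m : List (String × ν)) (k : String) (v : ν) : List (String × ν) :=
  ((PySem.Dict.mk m).insert k v).items

def pyModify {ν : Type} (m : List (String × ν)) (k : String) (dflt : ν) (f : ν → ν) : List (String × ν) :=
  ((PySem.Dict.mk m).modify k dflt f).items

-- ===== PORT A =====
def restructure_by_category (categorized_catalog : List (String × List (String × String))) : List (String × List (String × List (String × List (String × String)))) :=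
  categorized_catalog.foldl
    (fun structured p =>
      let category := (PySem.Dict.mk p.2).getD "category" "Uncategorized"
      let structured :=
        if (PySem.Dict.mk structured).contains category then structured
        else pyInsert structured category [("datasets", [])]
      let dataset_meta :=
        p.2.foldl (fun d kv => if kv.1 != "category" then pyInsert d kv.1 kv.2 else d) []
      pyModify structured category []
        (fun inner => pyModify inner "datasets" []
          (fun ds => pyInsert ds p.1 dataset_meta)))
    []

-- ===== PORT B =====
def bKey (metadata : List (String × String)) : String :=
  (PySem.Dict.mk metadata).getD "category" "Uncategorized"

def bMeta (metadata : List (String × String)) : List (String × String) :=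
  metadata.foldl (fun d kv => if kv.1 != "category" then pyInsert d kv.1 kv.2 else d) []

def restructure_by_category_alt (categorized_catalog : List (String × List (String × String))) : List (String × List (String × List (String × List (String × String)))) :=
  let categories : PySem.Set String :=
    categorized_catalog.foldl (fun acc p => PySem.Set.add acc (bKey p.2)) PySem.Set.empty
  categories.foldl
    (fun out c =>
      pyInsert out c
        [("datasets",
          categorized_catalog.foldl
            (fun d p => if bKey p.2 == c then pyInsert d p.1 (bMeta p.2) else d) [])])
    []

-- ===== PRECONDITION & SPEC =====
def Spec_restructure_by_category (categorized_catalog : List (String × List (String × String))) (out : List (String × List (String × List (String × List (String × String))))) : Prop := out = restructure_by_category_alt categorized_catalog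
instance (categorized_catalog : List (String × List (String × String))) (out : List (String × List (String × List (String × List (String × String))))) : Decidable (Spec_restructure_by_category categorized_catalog out) := by
  unfold Spec_restructure_by_category
  letI d4 : DecidableEq (List (String × List (String × String))) := inferInstance
  letI d6 : DecidableEq (List (String × List (String × List (String × String)))) := inferInstance
  letI d8 : DecidableEq (List (String × List (String × List (String × List (String × String))))) := inferInstance
  exact d8 out _

-- ===== CLAIM (what is proved, stated in full; the proofs are below) =====
def Claim_equal_restructure_by_category : Prop := ∀ (categorized_catalog : List (String × List (String × String))), Dom_restructure_by_category categorized_catalog → Spec_restructure_by_category categorized_catalog (restructure_by_category categorized_catalog)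

-- ===== LEMMAS AND PROOFS =====

-- the list of categories in first-appearance order
def catsL (l : List (String × List (String × String))) : List String :=
  PySem.Set.ofList (l.map (fun p => bKey p.2))

-- the finished dataset group of one category (B's inner comprehension)
def dsL (c : String) (l : List (String × List (String × String))) : List (String × List (String × String)) :=
  l.foldl (fun d p => if bKey p.2 == c then pyInsert d p.1 (bMeta p.2) else d) []

-- the grouped form both programs compute
def ML (l : List (String × List (String × String))) : List (String × List (String × List (String × List (String × String)))) :=
  (catsL l).map (fun c => (c, [("datasets", dsL c l)]))

theorem getD_mapform {ν : Type} (ks : List String) (v : String → ν) (k : String) (d0 : ν)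
    (h : k ∈ ks) :
    (PySem.Dict.mk (ks.map (fun c => (c, v c)))).getD k d0 = v k := by
  induction ks with
  | nil => cases h
  | cons a t ih =>
    by_cases hak : a = k
    · subst hak
      simp [PySem.Dict.getD, PySem.Dict.get?]
    · have ht : k ∈ t := by
        cases h with
        | head => exact absurd rfl hak
        | tail _ h => exact h
      have hb : (a == k) = false := by simp [hak]
      simpa [PySem.Dict.getD, PySem.Dict.get?, List.find?, hb] using ih ht

theorem contains_mapform {ν : Type} (ks : List String) (v : String → ν) (k : String) :
    (PySem.Dict.mk (ks.map (fun c => (c, v c)))).contains k = decide (k ∈ ks) := by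
  induction ks with
  | nil => simp [PySem.Dict.contains]
  | cons a t ih =>
    simp only [PySem.Dict.contains, List.map_cons, List.any_cons] at *
    by_cases hak : a = k
    · simp [hak]
    · simp [hak, ih, (Ne.symm hak : k ≠ a)]

theorem modify_mapform {ν : Type} (ks : List String) (v : String → ν) (k : String) (d0 : ν)
    (f : ν → ν) (h : k ∈ ks) :
    pyModify (ks.map (fun c => (c, v c))) k d0 f
      = ks.map (fun c => (c, if c = k then f (v k) else v c)) := by
  have hc : (PySem.Dict.mk (ks.map (fun c => (c, v c)))).contains k = true := by
    rw [contains_mapform]; simp [h]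
  have hins := PySem.Dict.items_insert_of_contains
      (PySem.Dict.mk (ks.map (fun c => (c, v c))))
      (f ((PySem.Dict.mk (ks.map (fun c => (c, v c)))).getD k d0)) hc
  rw [pyModify, PySem.Dict.modify, hins, getD_mapform ks v k d0 h, List.map_map]
  refine List.map_congr_left (fun c _ => ?_)
  by_cases hck : c = k <;> simp [hck]

theorem insert_fresh {ν : Type} (m : List (String × ν)) (k : String) (v : ν)
    (h : (PySem.Dict.mk m).contains k = false) :
    pyInsert m k v = m ++ [(k, v)] := by
  rw [pyInsert, PySem.Dict.items_insert_of_not_contains _ _ h]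

theorem modify_singleton {ν : Type} (a : String) (x : ν) (d0 : ν) (f : ν → ν) :
    pyModify [(a, x)] a d0 f = [(a, f x)] := by
  simp [pyModify, PySem.Dict.modify, PySem.Dict.insert, PySem.Dict.contains,
        PySem.Dict.getD, PySem.Dict.get?]

theorem cats_snoc (l : List (String × List (String × String))) (p : String × List (String × String)) :
    catsL (l ++ [p]) = if (catsL l).contains (bKey p.2) then catsL l else catsL l ++ [bKey p.2] := by
  simp [catsL, PySem.Set.ofList, List.foldl_append, PySem.Set.add]

theorem ds_snoc (c : String) (l : List (String × List (String × String))) (p : String × List (String × String)) :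
    dsL c (l ++ [p]) = if bKey p.2 == c then pyInsert (dsL c l) p.1 (bMeta p.2) else dsL c l := by
  simp [dsL, List.foldl_append]

theorem ds_acc (c : String) (l : List (String × List (String × String)))
    (acc : List (String × List (String × String)))
    (h : ∀ p ∈ l, bKey p.2 ≠ c) :
    l.foldl (fun d p => if bKey p.2 == c then pyInsert d p.1 (bMeta p.2) else d) acc = acc := by
  induction l generalizing acc with
  | nil => rfl
  | cons q t ih =>
    have hq : (bKey q.2 == c) = false := by
      simp [h q (List.mem_cons_self)]
    simp only [List.foldl_cons, hq, Bool.false_eq_true, if_false]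
    exact ih acc (fun p hp => h p (List.mem_cons_of_mem _ hp))

theorem ds_empty_of_not_mem (c : String) (l : List (String × List (String × String)))
    (h : c ∉ catsL l) : dsL c l = [] := by
  refine ds_acc c l [] (fun p hp hc => h ?_)
  rw [catsL, PySem.Set.mem_ofList]
  exact hc ▸ List.mem_map_of_mem hp

theorem mainA (l : List (String × List (String × String))) :
    restructure_by_category l = ML l := by
  induction l using List.reverseRecOn with
  | nil => rfl
  | append_singleton l p ih =>
    rw [restructure_by_category, List.foldl_append]
    rw [restructure_by_category] at ih
    rw [ih]
    simp only [List.foldl_cons, List.foldl_nil]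
    rw [show (PySem.Dict.mk p.2).getD "category" "Uncategorized" = bKey p.2 from rfl,
        show p.2.foldl (fun d kv => if kv.1 != "category" then pyInsert d kv.1 kv.2 else d) []
          = bMeta p.2 from rfl]
    by_cases hmem : bKey p.2 ∈ catsL l
    · -- category already present: the guard does nothing, modify updates in place
      have hcont : (PySem.Dict.mk (ML l)).contains (bKey p.2) = true := by
        rw [ML, contains_mapform]; simp [hmem]
      rw [if_pos hcont]
      rw [ML, modify_mapform _ _ _ _ _ hmem, ML, cats_snoc,
          if_pos (List.elem_eq_true_of_mem hmem)]
      refine List.map_congr_left (fun c hc => ?_)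
      rw [ds_snoc]
      by_cases hck : c = bKey p.2
      · subst hck
        simp [modify_singleton]
      · have hne : (bKey p.2 == c) = false := by simp [(Ne.symm hck : bKey p.2 ≠ c)]
        simp [hck, hne]
    · -- new category: the guard appends an empty group, modify fills it
      have hcont : (PySem.Dict.mk (ML l)).contains (bKey p.2) = false := by
        rw [ML, contains_mapform]; simp [hmem]
      rw [if_neg (by simp [hcont])]
      rw [insert_fresh _ _ _ hcont]
      have hform : ML l ++ [(bKey p.2, [("datasets", [])])]
          = (catsL l ++ [bKey p.2]).map (fun c => (c, [("datasets", dsL c l)])) := by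
        rw [ML, List.map_append, List.map_singleton, ds_empty_of_not_mem _ _ hmem]
      rw [hform, modify_mapform _ _ _ _ _ (by simp), ML, cats_snoc,
          if_neg (by simp [hmem])]
      refine List.map_congr_left (fun c hc => ?_)
      rw [ds_snoc]
      by_cases hck : c = bKey p.2
      · subst hck
        simp [modify_singleton]
      · have hne : (bKey p.2 == c) = false := by simp [(Ne.symm hck : bKey p.2 ≠ c)]
        simp [hck, hne]

theorem insert_fold_fresh {ν : Type} (ks : List String) (v : String → ν) :
    ∀ acc : List (String × ν), ks.Nodup →
      (∀ k ∈ ks, (PySem.Dict.mk acc).contains k = false) →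
      ks.foldl (fun out c => pyInsert out c (v c)) acc = acc ++ ks.map (fun c => (c, v c)) := by
  induction ks with
  | nil => intro acc _ _; simp
  | cons a t ih =>
    intro acc hnd hfresh
    have ha := hfresh a (List.mem_cons_self)
    have hacc : ∀ k ∈ t, (PySem.Dict.mk (acc ++ [(a, v a)])).contains k = false := by
      intro k hk
      have hka' : ¬ a = k := fun h => (List.nodup_cons.mp hnd).1 (h ▸ hk)
      have hka : (a == k) = false := by simp [hka']
      have h2 := hfresh k (List.mem_cons_of_mem _ hk)
      simp only [PySem.Dict.contains, List.any_append] at h2 ⊢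
      simp [h2, hka]
    rw [List.foldl_cons, insert_fresh acc a (v a) ha, ih (acc ++ [(a, v a)]) hnd.of_cons hacc]
    simp

theorem mainB (l : List (String × List (String × String))) :
    restructure_by_category_alt l = ML l := by
  have hcats : l.foldl (fun acc p => PySem.Set.add acc (bKey p.2)) PySem.Set.empty = catsL l := by
    rw [catsL, PySem.Set.ofList, List.foldl_map]
  rw [restructure_by_category_alt]
  simp only [hcats]
  have h := insert_fold_fresh (catsL l) (fun c => [("datasets", dsL c l)]) []
    (by rw [catsL]; exact PySem.Set.nodup_ofList _) (by intro k _; simp [PySem.Dict.contains])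
  simpa [ML, dsL] using h

-- ===== VERDICT (by name: the statement is the Claim_ definition above) =====
theorem restructure_by_category_spec : Claim_equal_restructure_by_category := by
  intro cc _
  unfold Spec_restructure_by_category
  rw [mainA, mainB]
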